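-- pv_equiv track=rewrite | github.com/enricosorrentino72-code/test | POC/Streaming_Purchase/Streaming_Purchase_Order_Item/utility/azure_utils.py | extract_eventhub_name_from_connection
-- ===== SOURCE A (Python) =====
-- from typing import Dict, List, Any, Optional, Tuple
--
-- def extract_eventhub_name_from_connection(connection_string: str) -> Optional[str]:
--     """
--     Extract EventHub name from connection string if present.
--
--     Args:
--         connection_string: EventHub connection string
--
--     Returns:
--         Optional[str]: EventHub name or None
--     """
--     try:
--         parts = connection_string.split(";")
--         for part in parts:
--             if part.startswith("EntityPath="):
--                 return part.split("=", 1)[1]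
--         return None
--
--     except Exception:
--         return None
-- ===== SOURCE B (Python) =====
-- def extract_eventhub_name_from_connection(connection_string):
--     """Extract EventHub name from connection string if present."""
--     try:
--         params = {}
--         for part in connection_string.split(";"):
--             if "=" in part:
--                 key, value = part.split("=", 1)
--                 params.setdefault(key, value)
--         return params.get("EntityPath")
--     except Exception:
--         return None
-- ===== Notes on version B (the rewrite author's own statement) =====
-- stated objective: idiomatic
-- what changed: B parses the whole connection string into a first-occurrence-wins parameter dict (split on ';', split each part on '=' once, setdefault) and then looks up 'EntityPath', instead of A's prefix-scanning loop with an early return.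
import Mathlib
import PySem

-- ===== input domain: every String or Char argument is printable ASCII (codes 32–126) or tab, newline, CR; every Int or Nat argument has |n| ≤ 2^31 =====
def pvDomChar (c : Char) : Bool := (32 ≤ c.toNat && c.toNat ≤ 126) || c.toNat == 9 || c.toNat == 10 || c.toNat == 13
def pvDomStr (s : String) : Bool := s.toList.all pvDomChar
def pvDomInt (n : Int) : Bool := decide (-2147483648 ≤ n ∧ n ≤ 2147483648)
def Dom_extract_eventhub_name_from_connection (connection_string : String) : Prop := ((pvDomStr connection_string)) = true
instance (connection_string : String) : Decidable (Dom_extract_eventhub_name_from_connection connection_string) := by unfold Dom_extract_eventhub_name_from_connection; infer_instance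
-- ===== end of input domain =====

-- B builds a first-occurrence-wins dict of all connection-string parameters and looks up
-- 'EntityPath', instead of A's prefix-scanning loop with an early return (objective: idiomatic).

-- ===== PORT A =====
-- A's loop: for part in parts: if part.startswith("EntityPath="): return part.split("=", 1)[1]
-- (under the startswith guard '=' is in part, so pyGet? 1 is exactly the piece Python returns)
def goA : List String → Option String
  | [] => none
  | p :: rest =>
    if PySem.Str.startswith p "EntityPath=" then
      PySem.List.pyGet? ((PySem.Str.splitMax? p "=" 1).getD []) 1
    else goA rest

def extract_eventhub_name_from_connection (connection_string : String) : Option String :=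
  -- connection_string.split(";"); sep ";" is nonempty so split? is always some
  goA ((PySem.Str.split? connection_string ";").getD [])

-- ===== PORT B =====
-- one loop iteration of B: if "=" in part: key, value = part.split("=", 1); params.setdefault(key, value)
-- ('=' in part guarantees the split has exactly two pieces; the catch-all arm is unreachable)
def bStep (d : PySem.Dict String String) (part : String) : PySem.Dict String String :=
  if PySem.Str.isIn "=" part then
    match (PySem.Str.splitMax? part "=" 1).getD [] with
    | [k, v] => d.setdefault k v
    | _ => d
  else d

def extract_eventhub_name_from_connection_alt (connection_string : String) : Option String :=
  (((PySem.Str.split? connection_string ";").getD []).foldl bStep PySem.Dict.empty).get? "EntityPath"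

-- ===== PRECONDITION & SPEC =====
def Spec_extract_eventhub_name_from_connection (connection_string : String) (out : Option String) : Prop := out = extract_eventhub_name_from_connection_alt connection_string
instance (connection_string : String) (out : Option String) : Decidable (Spec_extract_eventhub_name_from_connection connection_string out) := by unfold Spec_extract_eventhub_name_from_connection; infer_instance

-- ===== CLAIM (what is proved, stated in full; the proofs are below) =====
def Claim_equal_extract_eventhub_name_from_connection : Prop := ∀ (connection_string : String), Dom_extract_eventhub_name_from_connection connection_string → Spec_extract_eventhub_name_from_connection connection_string (extract_eventhub_name_from_connection connection_string)

-- ===== LEMMAS AND PROOFS =====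

-- splitOnMax.go with maxsplit exhausted returns the remainder as one piece
theorem goZeroLemma (sep : List Char) (fuel : Nat) (l cur : List Char) (acc : List (List Char)) :
    PySem.Chars.splitOnMax.go sep fuel 0 l cur acc = ((cur.reverse ++ l) :: acc).reverse := by
  cases fuel with
  | zero => simp [PySem.Chars.splitOnMax.go]
  | succ f =>
    cases l with
    | nil => simp [PySem.Chars.splitOnMax.go]
    | cons c rest => simp [PySem.Chars.splitOnMax.go]

-- splitOnMax.go with sep "=", maxsplit 1: split at the first '=' if any
theorem goOneLemma : ∀ (l : List Char) (fuel : Nat) (cur : List Char) (acc : List (List Char)),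
    l.length ≤ fuel →
    PySem.Chars.splitOnMax.go ['='] (fuel + 1) 1 l cur acc =
      if '=' ∈ l then
        acc.reverse ++ [cur.reverse ++ l.takeWhile (fun c => c != '='),
                        (l.dropWhile (fun c => c != '=')).tail]
      else acc.reverse ++ [cur.reverse ++ l] := by
  intro l
  induction l with
  | nil => intro fuel cur acc _; simp [PySem.Chars.splitOnMax.go]
  | cons c rest ih =>
    intro fuel cur acc hlen
    cases fuel with
    | zero => simp at hlen
    | succ f =>
      have hrest : rest.length ≤ f := by simpa using hlen
      by_cases hc : c = '='
      · subst hc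
        have h1 : PySem.Chars.splitOnMax.go ['='] (f + 1 + 1) 1 ('=' :: rest) cur acc
            = PySem.Chars.splitOnMax.go ['='] (f + 1) 0 rest [] (cur.reverse :: acc) := by
          simp [PySem.Chars.splitOnMax.go, List.isPrefixOf]
        rw [h1, goZeroLemma]
        simp [List.takeWhile, List.dropWhile]
      · have hc' : ¬ ('=' = c) := fun h => hc h.symm
        have hne : ('=' == c) = false := by simpa using hc'
        have hcb : (c != '=') = true := by simpa using hc
        have h1 : PySem.Chars.splitOnMax.go ['='] (f + 1 + 1) 1 (c :: rest) cur acc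
            = PySem.Chars.splitOnMax.go ['='] (f + 1) 1 rest (c :: cur) acc := by
          simp [PySem.Chars.splitOnMax.go, List.isPrefixOf, hne]
        rw [h1, ih f (c :: cur) acc hrest]
        have hmem : ('=' ∈ c :: rest) ↔ ('=' ∈ rest) := by
          simp [List.mem_cons, hc']
        by_cases hm : '=' ∈ rest
        · rw [if_pos hm, if_pos (hmem.2 hm)]
          simp [hcb]
        · rw [if_neg hm, if_neg (fun h => hm (hmem.1 h))]
          simp

theorem splitMax1 (p : List Char) :
    PySem.Chars.splitOnMax p ['='] 1 =
      if '=' ∈ p then [p.takeWhile (fun c => c != '='), (p.dropWhile (fun c => c != '=')).tail]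
      else [p] := by
  unfold PySem.Chars.splitOnMax
  rw [if_neg (by norm_num)]
  have h := goOneLemma p p.length [] [] le_rfl
  simp only [List.reverse_nil, List.nil_append] at h
  exact h

theorem strSplitMax (p : String) (h : '=' ∈ p.toList) :
    (PySem.Str.splitMax? p "=" 1).getD [] =
      [String.ofList (p.toList.takeWhile (fun c => c != '=')),
       String.ofList ((p.toList.dropWhile (fun c => c != '=')).tail)] := by
  have hsep : ("=".toList) = ['='] := rfl
  simp [PySem.Str.splitMax?, PySem.Chars.splitMax?, hsep, splitMax1, h]

theorem takeWhile_append_eq (k t : List Char) (hk : '=' ∉ k) :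
    ((k ++ '=' :: t).takeWhile (fun c => c != '=')) = k := by
  induction k with
  | nil => simp
  | cons a k ih =>
    simp only [List.mem_cons, not_or] at hk
    have ha' : a ≠ '=' := fun h => hk.1 h.symm
    have ha : (a != '=') = true := by simpa using ha'
    simp only [List.cons_append, List.takeWhile_cons, ha]
    simp [ih (by simpa using hk.2)]

theorem dropWhile_mem : ∀ (l : List Char), '=' ∈ l →
    l.dropWhile (fun c => c != '=') = '=' :: (l.dropWhile (fun c => c != '=')).tail := by
  intro l hl
  induction l with
  | nil => simp at hl
  | cons a rest ih =>
    by_cases ha : a = '='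
    · subst ha; simp [List.dropWhile]
    · have hm : '=' ∈ rest := by
        rcases List.mem_cons.1 hl with h | h
        · exact absurd h.symm ha
        · exact h
      have hab : (a != '=') = true := by simpa using ha
      simp only [List.dropWhile_cons, hab, if_true]
      exact ih hm

theorem prefix_iff (l : List Char) (hl : '=' ∈ l) :
    (("EntityPath".toList ++ ['=']) <+: l) ↔
      l.takeWhile (fun c => c != '=') = "EntityPath".toList := by
  have hk : '=' ∉ "EntityPath".toList := by decide
  constructor
  · rintro ⟨t, ht⟩
    have hle : l = "EntityPath".toList ++ '=' :: t := by
      rw [← ht]; simp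
    rw [hle]
    exact takeWhile_append_eq _ _ hk
  · intro htw
    have hsplit : l = l.takeWhile (fun c => c != '=') ++ l.dropWhile (fun c => c != '=') :=
      (List.takeWhile_append_dropWhile).symm
    refine ⟨(l.dropWhile (fun c => c != '=')).tail, ?_⟩
    calc ("EntityPath".toList ++ ['=']) ++ (l.dropWhile (fun c => c != '=')).tail
        = "EntityPath".toList ++ ('=' :: (l.dropWhile (fun c => c != '=')).tail) := by simp
      _ = l.takeWhile (fun c => c != '=') ++ l.dropWhile (fun c => c != '=') := by
          rw [htw, ← dropWhile_mem l hl]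
      _ = l := hsplit.symm

theorem startswith_char (p : String) :
    PySem.Str.startswith p "EntityPath=" = true ↔
      ("EntityPath".toList ++ ['=']) <+: p.toList := by
  have h : ("EntityPath=".toList) = "EntityPath".toList ++ ['='] := rfl
  rw [PySem.Str.startswith, PySem.Chars.startswith_iff, h]

theorem isIn_eq_char (p : String) : PySem.Str.isIn "=" p = true ↔ '=' ∈ p.toList := by
  have hsep : ("=".toList) = ['='] := rfl
  rw [PySem.Str.isIn, hsep, PySem.Chars.isIn_iff_infix]
  constructor
  · intro h
    exact h.subset (by simp)
  · intro h
    rcases List.append_of_mem h with ⟨s, t, hst⟩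
    exact ⟨s, t, by rw [hst]; simp⟩

theorem pyGet?_pair (k v : String) : PySem.List.pyGet? [k, v] 1 = some v := rfl

-- B's step on a part containing '=' is one setdefault with the split pieces
theorem bStep_eq (d : PySem.Dict String String) (p : String) (hin : '=' ∈ p.toList) :
    bStep d p =
      d.setdefault (String.ofList (p.toList.takeWhile (fun c => c != '=')))
        (String.ofList ((p.toList.dropWhile (fun c => c != '=')).tail)) := by
  have hIn : PySem.Str.isIn "=" p = true := (isIn_eq_char p).2 hin
  unfold bStep
  rw [if_pos hIn, strSplitMax p hin]

theorem bStep_skip (d : PySem.Dict String String) (p : String) (hin : '=' ∉ p.toList) :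
    bStep d p = d := by
  have hIn : PySem.Str.isIn "=" p = false := by
    rw [← Bool.not_eq_true]
    exact fun h => hin ((isIn_eq_char p).1 h)
  have hInC : PySem.Chars.isIn ['='] p.toList = false := hIn
  unfold bStep
  rw [if_neg (by simp [hInC])]

-- A's scan step rewritten with the same split pieces
theorem goA_hit (p : String) (rest : List String) (hsw : PySem.Str.startswith p "EntityPath=" = true)
    (hin : '=' ∈ p.toList) :
    goA (p :: rest) = some (String.ofList ((p.toList.dropWhile (fun c => c != '=')).tail)) := by
  simp only [goA]
  rw [if_pos hsw, strSplitMax p hin, pyGet?_pair]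

theorem goA_miss (p : String) (rest : List String) (hsw : ¬ PySem.Str.startswith p "EntityPath=" = true) :
    goA (p :: rest) = goA rest := by
  simp only [goA]
  rw [if_neg hsw]

-- the dict fold remembers the FIRST value per key; looked up at "EntityPath" it is A's scan
theorem main_lemma : ∀ (parts : List String) (d : PySem.Dict String String),
    (parts.foldl bStep d).get? "EntityPath" = (d.get? "EntityPath").or (goA parts) := by
  intro parts
  induction parts with
  | nil => intro d; simp [goA]
  | cons p rest ih =>
    intro d
    simp only [List.foldl_cons]
    by_cases hin : '=' ∈ p.toList
    · rw [bStep_eq d p hin]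
      by_cases hsw : PySem.Str.startswith p "EntityPath=" = true
      · have hkey : p.toList.takeWhile (fun c => c != '=') = "EntityPath".toList :=
          (prefix_iff _ hin).1 ((startswith_char p).1 hsw)
        have hkeyS : String.ofList (p.toList.takeWhile (fun c => c != '=')) = "EntityPath" := by
          rw [hkey]; rfl
        rw [hkeyS, ih, PySem.Dict.get?_setdefault_self, goA_hit p rest hsw hin]
        cases hd : d.get? "EntityPath" <;> simp
      · have hkeyne : ("EntityPath" : String) ≠
            String.ofList (p.toList.takeWhile (fun c => c != '=')) := by
          intro h
          apply hsw
          rw [startswith_char]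
          apply (prefix_iff _ hin).2
          simpa using (congrArg String.toList h).symm
        rw [ih, PySem.Dict.get?_setdefault_of_ne d _ hkeyne, goA_miss p rest hsw]
    · have hsw : ¬ PySem.Str.startswith p "EntityPath=" = true := by
        rw [startswith_char]
        intro h
        exact hin (h.subset (by simp))
      rw [bStep_skip d p hin, ih, goA_miss p rest hsw]

-- ===== VERDICT (by name: the statement is the Claim_ definition above) =====
theorem extract_eventhub_name_from_connection_spec : Claim_equal_extract_eventhub_name_from_connection := by
  intro cs _
  unfold Spec_extract_eventhub_name_from_connection
  unfold extract_eventhub_name_from_connection extract_eventhub_name_from_connection_alt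
  rw [main_lemma, PySem.Dict.get?_empty]
  simp
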